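-- pv_equiv track=rewrite | github.com/MSakharov98/skillsmart_homeworks | dictionaries_maps.py | find_repeated_values
-- ===== SOURCE A (Python) =====
-- def find_repeated_values(numbers, repeats):
--     count_dict = {}  # Словарь для подсчета повторений значений
--     repeated_values = []  # Список для хранения повторяющихся значений
--
--     # Подсчитываем количество повторений для каждого значения в списке
--     for number in numbers:
--         if number in count_dict:
--             count_dict[number] += 1
--         else:
--             count_dict[number] = 1
--
--     # Добавляем значения, которые повторяются не менее N раз, в список repeated_values
--     for number, count in count_dict.items():
--         if count >= repeats:
--             repeated_values.append(number)
--
--     return repeated_values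
-- ===== SOURCE B (Python) =====
-- def find_repeated_values(numbers, repeats):
--     result = []
--     seen = set()
--     for n in numbers:
--         if n not in seen:
--             seen.add(n)
--             if numbers.count(n) >= repeats:
--                 result.append(n)
--     return result
-- ===== Notes on version B (the rewrite author's own statement) =====
-- stated objective: simpler
-- what changed: Replaced the two-pass count-dictionary construction and items filter by a single pass over the list with a seen-set, calling numbers.count(n) on each first occurrence.
import Mathlib
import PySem

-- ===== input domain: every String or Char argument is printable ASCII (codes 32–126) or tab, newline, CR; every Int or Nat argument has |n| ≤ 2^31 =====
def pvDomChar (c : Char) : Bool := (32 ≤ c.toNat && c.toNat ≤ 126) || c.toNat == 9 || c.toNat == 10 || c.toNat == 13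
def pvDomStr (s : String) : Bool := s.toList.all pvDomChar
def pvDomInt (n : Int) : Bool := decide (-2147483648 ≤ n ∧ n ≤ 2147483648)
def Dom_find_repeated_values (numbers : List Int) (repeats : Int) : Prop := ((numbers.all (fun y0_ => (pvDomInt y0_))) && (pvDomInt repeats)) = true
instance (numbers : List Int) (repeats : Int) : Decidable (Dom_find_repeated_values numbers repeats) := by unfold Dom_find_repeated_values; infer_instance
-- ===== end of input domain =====

-- B replaces A's two passes (build a count dict, then filter its items) by one pass with a
-- seen-set calling numbers.count(n) on each first occurrence; objective: simpler (not faster).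

-- ===== PORT A =====
def find_repeated_values (numbers : List Int) (repeats : Int) : List Int :=
  -- count_dict building loop: d[number] += 1 when present, else d[number] = 1
  let count_dict : PySem.Dict Int Int :=
    numbers.foldl (fun d number =>
      if d.contains number then d.insert number (d.getD number 0 + 1)
      else d.insert number 1) PySem.Dict.empty
  -- items filter loop
  count_dict.items.foldl (fun repeated_values p =>
    if p.2 ≥ repeats then repeated_values ++ [p.1] else repeated_values) []

-- ===== PORT B =====
def find_repeated_values_alt (numbers : List Int) (repeats : Int) : List Int :=
  (numbers.foldl (fun (st : PySem.Set Int × List Int) n =>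
      if PySem.Set.contains st.1 n then st
      else (PySem.Set.add st.1 n,
            if ((PySem.List.count numbers n : Int) ≥ repeats) then st.2 ++ [n] else st.2))
    (PySem.Set.empty, [])).2

-- ===== PRECONDITION & SPEC =====
def Spec_find_repeated_values (numbers : List Int) (repeats : Int) (out : List Int) : Prop := out = find_repeated_values_alt numbers repeats
instance (numbers : List Int) (repeats : Int) (out : List Int) : Decidable (Spec_find_repeated_values numbers repeats out) := by unfold Spec_find_repeated_values; infer_instance

-- ===== CLAIM (what is proved, stated in full; the proofs are below) =====
def Claim_equal_find_repeated_values : Prop := ∀ (numbers : List Int) (repeats : Int), Dom_find_repeated_values numbers repeats → Spec_find_repeated_values numbers repeats (find_repeated_values numbers repeats)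

-- ===== LEMMAS AND PROOFS =====

-- A's counting step equals the insert/getD counting step on every dict.
theorem pvA_dict_eq (numbers : List Int) :
    numbers.foldl (fun d number =>
      if d.contains number then d.insert number (d.getD number 0 + 1)
      else d.insert number 1) PySem.Dict.empty = PySem.Dict.counter numbers := by
  have hstep : (fun (d : PySem.Dict Int Int) number =>
      if d.contains number then d.insert number (d.getD number 0 + 1)
      else d.insert number 1)
      = (fun d number => d.insert number (d.getD number 0 + 1)) := by
    funext d number
    by_cases h : d.contains number = true
    · simp [h]
    · simp only [Bool.not_eq_true] at h
      simp [h, PySem.Dict.getD_of_not_contains d 0 h]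
  rw [hstep, PySem.Dict.foldl_insert_getD_add_one_eq_counter]

-- the seen-set grown by repeated Set.add extends the start set as a prefix
theorem pvSet_foldl_prefix (l : List Int) : ∀ (s : PySem.Set Int),
    s <+: l.foldl PySem.Set.add s := by
  induction l with
  | nil => intro s; exact List.prefix_refl s
  | cons n t ih =>
    intro s
    simp only [List.foldl_cons]
    refine List.IsPrefix.trans ?_ (ih (PySem.Set.add s n))
    by_cases h : PySem.Set.contains s n = true
    · simp only [PySem.Set.add, h, if_true]
      exact List.prefix_refl s
    · simp only [Bool.not_eq_true] at h
      simp only [PySem.Set.add, h, Bool.false_eq_true, if_false]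
      exact List.prefix_append s [n]

-- loop invariant for B: the output is the filter of the newly seen elements, in order
theorem pvB_inv (numbers : List Int) (repeats : Int) (l : List Int) :
    ∀ (s : PySem.Set Int) (out : List Int),
    (l.foldl (fun (st : PySem.Set Int × List Int) n =>
      if PySem.Set.contains st.1 n then st
      else (PySem.Set.add st.1 n,
            if ((PySem.List.count numbers n : Int) ≥ repeats) then st.2 ++ [n] else st.2))
      (s, out))
    = (l.foldl PySem.Set.add s,
       out ++ ((l.foldl PySem.Set.add s).drop s.length).filter
         (fun k => decide ((PySem.List.count numbers k : Int) ≥ repeats))) := by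
  induction l with
  | nil => intro s out; simp
  | cons n t ih =>
    intro s out
    simp only [List.foldl_cons]
    by_cases h : PySem.Set.contains s n = true
    · have hadd : PySem.Set.add s n = s := by simp only [PySem.Set.add, h, if_true]
      simp only [h, if_true, hadd]
      exact ih s out
    · simp only [Bool.not_eq_true] at h
      have hadd : PySem.Set.add s n = s ++ [n] := by
        simp only [PySem.Set.add, h, Bool.false_eq_true, if_false]
      simp only [h, Bool.false_eq_true, if_false]
      rw [ih]
      obtain ⟨r, hr⟩ := hadd ▸ pvSet_foldl_prefix t (PySem.Set.add s n)
      rw [hadd, ← hr]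
      have hdrop1 : ((s ++ [n]) ++ r).drop s.length = n :: r := by
        rw [List.append_assoc, List.drop_left]; rfl
      have hdrop2 : ((s ++ [n]) ++ r).drop (s ++ [n]).length = r := List.drop_left
      rw [hdrop1, hdrop2, List.filter_cons]
      by_cases hp : repeats ≤ (List.count n numbers : Int)
      · simp [hp]
      · simp [hp]

-- B computes the first-occurrence-ordered distinct values whose count meets the bound
theorem pvB_closed (numbers : List Int) (repeats : Int) :
    find_repeated_values_alt numbers repeats
    = (PySem.Set.ofList numbers).filter
        (fun k => decide ((PySem.List.count numbers k : Int) ≥ repeats)) := by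
  unfold find_repeated_values_alt
  rw [pvB_inv numbers repeats numbers PySem.Set.empty []]
  simp [PySem.Set.ofList_eq_foldl, PySem.Set.empty]

-- ===== VERDICT (by name: the statement is the Claim_ definition above) =====
theorem find_repeated_values_spec : Claim_equal_find_repeated_values := by
  intro numbers repeats _
  unfold Spec_find_repeated_values find_repeated_values
  rw [pvA_dict_eq, pvB_closed]
  simp only [PySem.Dict.items_counter, List.foldl_map]
  have hf : (fun (acc : List Int) (k : Int) =>
        if ((List.count k numbers : Int) ≥ repeats) then acc ++ [k] else acc)
      = (fun acc k =>
        if (fun k => decide ((PySem.List.count numbers k : Int) ≥ repeats)) k = true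
        then acc ++ [(fun (k : Int) => k) k] else acc) := by
    funext acc k
    simp [PySem.List.count]
  rw [hf, PySem.List.foldl_append_if]
  simp [PySem.List.count]
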